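-- pv_equiv track=rewrite | github.com/gabepen/circleseq | make_brpileup.py | best_base
-- ===== SOURCE A (Python) =====
-- def best_base(basecounts: dict) -> tuple:
--     """
--     Determine consensus base from base counts.
--
--     Args:
--         basecounts: Dictionary of base counts
--
--     Returns:
--         tuple: (consensus base, count)
--     """
--     if all([c==0 for c in basecounts.values()]):
--         return ('N',0)
--     nonz = sorted([(b,c) for b,c in basecounts.items() if c > 0], key=lambda x:x[1], reverse=True)
--     if len(nonz) == 1:
--         return nonz[0]
--     elif len(nonz) > 1:
--         return ('N', nonz[0][1])  # Use N if there's any controversy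
--     else:
--         return ('N',0)
-- ===== SOURCE B (Python) =====
-- def best_base(basecounts: dict) -> tuple:
--     """One-pass consensus: track the max positive count and how many positives exist."""
--     best_b = 'N'
--     best_c = 0
--     positives = 0
--     for b, c in basecounts.items():
--         if c > 0:
--             positives += 1
--             if c > best_c:
--                 best_b, best_c = b, c
--     if positives == 1:
--         return (best_b, best_c)
--     return ('N', best_c)
-- ===== Notes on version B (the rewrite author's own statement) =====
-- stated objective: simpler
-- what changed: Replaced the all()-scan plus filtered-list build plus sort with a single pass that maintains the running maximum positive count and the number of positive entries.
import Mathlib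
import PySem

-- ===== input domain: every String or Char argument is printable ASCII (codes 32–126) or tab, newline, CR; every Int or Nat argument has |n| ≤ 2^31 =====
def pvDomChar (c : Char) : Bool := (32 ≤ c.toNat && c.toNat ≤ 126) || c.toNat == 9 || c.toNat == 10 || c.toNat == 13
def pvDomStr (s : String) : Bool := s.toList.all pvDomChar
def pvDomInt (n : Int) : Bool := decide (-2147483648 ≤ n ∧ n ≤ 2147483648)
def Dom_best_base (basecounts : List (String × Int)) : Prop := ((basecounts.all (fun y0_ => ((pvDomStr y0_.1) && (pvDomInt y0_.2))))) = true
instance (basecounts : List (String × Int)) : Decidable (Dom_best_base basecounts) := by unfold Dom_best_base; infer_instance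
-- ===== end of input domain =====

-- B replaces A's all()-scan + filter + sort with one pass keeping the max positive count
-- and the number of positive entries (objective: simpler).

-- ===== PORT A =====
def best_base (basecounts : List (String × Int)) : String × Int :=
  if (basecounts.map (fun bc => decide (bc.2 = 0))).all (fun b => b) then ("N", 0)
  else
    let nonz := PySem.List.sorted (basecounts.filter (fun bc => decide (0 < bc.2))) (fun x => x.2) true
    if nonz.length = 1 then nonz.headI
    else if 1 < nonz.length then ("N", nonz.headI.2)
    else ("N", 0)

-- ===== PORT B =====
def bbStep (s : String × Int × Int) (bc : String × Int) : String × Int × Int :=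
  if 0 < bc.2 then
    if s.2.1 < bc.2 then (bc.1, bc.2, s.2.2 + 1) else (s.1, s.2.1, s.2.2 + 1)
  else s

def best_base_alt (basecounts : List (String × Int)) : String × Int :=
  let st := basecounts.foldl bbStep ("N", 0, 0)
  if st.2.2 = 1 then (st.1, st.2.1) else ("N", st.2.1)

-- ===== PRECONDITION & SPEC =====
def Spec_best_base (basecounts : List (String × Int)) (out : String × Int) : Prop := out = best_base_alt basecounts
instance (basecounts : List (String × Int)) (out : String × Int) : Decidable (Spec_best_base basecounts out) := by unfold Spec_best_base; infer_instance

-- ===== CLAIM (what is proved, stated in full; the proofs are below) =====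
def Claim_equal_best_base : Prop := ∀ (basecounts : List (String × Int)), Dom_best_base basecounts → Spec_best_base basecounts (best_base basecounts)

-- ===== LEMMAS AND PROOFS =====

-- B's fold ignores non-positive entries: folding the list equals folding its positive filter.
theorem bbStep_fold_filter (l : List (String × Int)) (s : String × Int × Int) :
    l.foldl bbStep s = (l.filter (fun bc => decide (0 < bc.2))).foldl bbStep s := by
  induction l generalizing s with
  | nil => rfl
  | cons x t ih =>
    by_cases h : 0 < x.2 <;> simp [h, List.foldl_cons, bbStep, ih]

-- On an all-positive list the positives counter adds the length.
theorem bbStep_fold_pos (l : List (String × Int)) (s : String × Int × Int)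
    (h : ∀ x ∈ l, 0 < x.2) :
    (l.foldl bbStep s).2.2 = s.2.2 + l.length := by
  induction l generalizing s with
  | nil => simp
  | cons x t ih =>
    have hx := h x (by simp)
    have ht : ∀ y ∈ t, 0 < y.2 := fun y hy => h y (by simp [hy])
    simp only [List.foldl_cons, bbStep, if_pos hx]
    by_cases hc : s.2.1 < x.2 <;> simp [hc, ih _ ht] <;> omega

-- The running max is ≥ the initial value and ≥ every element's count.
theorem bbStep_fold_ge (l : List (String × Int)) (s : String × Int × Int)
    (h : ∀ x ∈ l, 0 < x.2) :
    s.2.1 ≤ (l.foldl bbStep s).2.1 ∧ ∀ x ∈ l, x.2 ≤ (l.foldl bbStep s).2.1 := by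
  induction l generalizing s with
  | nil => simp
  | cons x t ih =>
    have hx := h x (by simp)
    have ht : ∀ y ∈ t, 0 < y.2 := fun y hy => h y (by simp [hy])
    simp only [List.foldl_cons, bbStep, if_pos hx]
    by_cases hc : s.2.1 < x.2 <;> simp only [hc, if_pos, if_false] <;>
      rcases ih _ ht with ⟨h1, h2⟩
    · refine ⟨by simpa using le_trans (le_of_lt hc) (by simpa using h1), ?_⟩
      intro y hy
      rcases (List.mem_cons.mp hy) with rfl | hy'
      · simpa using h1
      · exact h2 y hy'
    · refine ⟨h1, ?_⟩
      intro y hy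
      rcases (List.mem_cons.mp hy) with rfl | hy'
      · exact le_trans (le_of_not_gt hc) h1
      · exact h2 y hy'

-- The running max is either the initial value or some element's count.
theorem bbStep_fold_mem (l : List (String × Int)) (s : String × Int × Int) :
    (l.foldl bbStep s).2.1 = s.2.1 ∨ ∃ x ∈ l, (l.foldl bbStep s).2.1 = x.2 := by
  induction l generalizing s with
  | nil => simp
  | cons x t ih =>
    simp only [List.foldl_cons, bbStep]
    by_cases hp : 0 < x.2
    · simp only [if_pos hp]
      by_cases hc : s.2.1 < x.2
      · simp only [if_pos hc]
        rcases ih (x.1, x.2, s.2.2 + 1) with h | ⟨y, hy, h⟩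
        · exact Or.inr ⟨x, by simp, h⟩
        · exact Or.inr ⟨y, by simp [hy], h⟩
      · simp only [if_neg hc]
        rcases ih (s.1, s.2.1, s.2.2 + 1) with h | ⟨y, hy, h⟩
        · exact Or.inl h
        · exact Or.inr ⟨y, by simp [hy], h⟩
    · simp only [if_neg hp]
      rcases ih s with h | ⟨y, hy, h⟩
      · exact Or.inl h
      · exact Or.inr ⟨y, by simp [hy], h⟩

-- Elements of the positive filter have positive count.
theorem pos_of_mem_filter (l : List (String × Int)) :
    ∀ x ∈ l.filter (fun bc => decide (0 < bc.2)), 0 < x.2 := by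
  intro x hx
  simpa using (List.mem_filter.mp hx).2

-- ===== VERDICT (by name: the statement is the Claim_ definition above) =====
theorem best_base_spec : Claim_equal_best_base := by
  intro l _
  unfold Spec_best_base best_base best_base_alt
  have hpos := pos_of_mem_filter l
  rw [bbStep_fold_filter]
  rcases hP : l.filter (fun bc => decide (0 < bc.2)) with _ | ⟨m, t⟩
  · -- no positive entries: both sides return ("N", 0)
    rw [hP]
    by_cases hall : (l.map (fun bc => decide (bc.2 = 0))).all (fun b => b) = true <;>
      simp [hall, PySem.List.sorted]
  · have hmf : m ∈ l.filter (fun bc => decide (0 < bc.2)) := by rw [hP]; simp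
    have hm : 0 < m.2 := hpos m hmf
    -- the all-zero test is false
    have hall : (l.map (fun bc => decide (bc.2 = 0))).all (fun b => b) = false := by
      have hml : m ∈ l := (List.mem_filter.mp hmf).1
      simp only [List.all_eq_false]
      exact ⟨decide (m.2 = 0), by simp only [List.mem_map]; exact ⟨m, hml, rfl⟩,
        by simp; omega⟩
    rw [hall, hP]
    simp only [Bool.false_eq_true, if_false]
    have hposP : ∀ x ∈ m :: t, 0 < x.2 := fun x hx => hpos x (by rw [hP]; exact hx)
    match t with
    | [] =>
      -- exactly one positive entry: both return it
      have hsing : PySem.List.sorted [m] (fun x => (x : String × Int).2) true = [m] := by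
        simp [PySem.List.sorted, PySem.List.insertBy]
      simp [hsing, List.foldl_cons, bbStep, hm]
    | m2 :: t2 =>
      -- two or more positive entries: both return ("N", max count)
      have hposP : ∀ x ∈ m :: m2 :: t2, 0 < x.2 := hposP
      have hlen : (PySem.List.sorted (m :: m2 :: t2) (fun x => (x : String × Int).2) true).length
          = (m :: m2 :: t2).length := PySem.List.length_sorted _ _ _
      have hnn : PySem.List.sorted (m :: m2 :: t2) (fun x => (x : String × Int).2) true ≠ [] := by
        intro h; rw [h] at hlen; simp at hlen
      match hS : PySem.List.sorted (m :: m2 :: t2) (fun x => (x : String × Int).2) true with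
      | [] => exact absurd hS hnn
      | h₀ :: rest =>
        have hlen' : (h₀ :: rest).length = t2.length + 2 := by rw [← hS, hlen]; simp
        have hh0mem : h₀ ∈ m :: m2 :: t2 := by
          have : h₀ ∈ PySem.List.sorted (m :: m2 :: t2) (fun x => (x : String × Int).2) true := by
            rw [hS]; simp
          exact (PySem.List.mem_sorted _ _ _ _).mp this
        have hh0ge : ∀ y ∈ m :: m2 :: t2, y.2 ≤ h₀.2 :=
          PySem.List.key_head_sorted_rev_ge (m :: m2 :: t2) (fun x => x.2) hS
        -- characterize B's running max as h₀.2
        rcases bbStep_fold_ge (m :: m2 :: t2) ("N", 0, 0) hposP with ⟨_, hge⟩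
        have hc_ge : h₀.2 ≤ ((m :: m2 :: t2).foldl bbStep ("N", 0, 0)).2.1 := hge h₀ hh0mem
        have hc_le : ((m :: m2 :: t2).foldl bbStep ("N", 0, 0)).2.1 ≤ h₀.2 := by
          rcases bbStep_fold_mem (m :: m2 :: t2) ("N", 0, 0) with h | ⟨y, hy, h⟩
          · rw [h]; exact le_of_lt (hposP h₀ hh0mem)
          · rw [h]; exact hh0ge y hy
        have hc : ((m :: m2 :: t2).foldl bbStep ("N", 0, 0)).2.1 = h₀.2 := le_antisymm hc_le hc_ge
        have hp2 := bbStep_fold_pos (m :: m2 :: t2) ("N", 0, 0) hposP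
        have hp2' : ((m :: m2 :: t2).foldl bbStep ("N", 0, 0)).2.2 ≠ 1 := by
          rw [hp2]; simp; omega
        have hne1 : ¬ (t2.length + 2 = 1) := by omega
        simp only [hlen', hc, hp2']
        simp [hne1]
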